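-- pv_equiv track=rewrite | github.com/philiptaylor/corridors-map-gen | generate-map.py | canon_side
-- ===== SOURCE A (Python) =====
-- def canon_side(s):
--     combs = (
--         [s[i] for i in (0,1,2,3,4,5,6)],
--         [s[i] for i in (1,4,0,3,6,2,5)],
--         [s[i] for i in (4,6,1,3,5,0,2)],
--         [s[i] for i in (6,5,4,3,2,1,0)],
--         [s[i] for i in (5,2,6,3,0,4,1)],
--         [s[i] for i in (2,0,5,3,1,6,4)],
--
--         # Try mirroring too
--         [s[i] for i in (1,0,4,3,2,6,5)],
--         [s[i] for i in (4,1,6,3,0,5,2)],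
--         [s[i] for i in (6,4,5,3,1,2,0)],
--         [s[i] for i in (5,6,2,3,4,0,1)],
--         [s[i] for i in (2,5,0,3,6,1,4)],
--         [s[i] for i in (0,2,1,3,5,4,6)],
--     )
--     return ''.join(sorted(combs)[0])
-- ===== SOURCE B (Python) =====
-- def canon_side(s):
--     # The 12 candidates of the original table are the orbit of the 7-char layout
--     # under the group generated by one rotation (rho) and one mirror flip:
--     # generate them by repeated application of rho to s and to its mirror image,
--     # keeping a running lexicographic minimum.
--     rho = (1, 4, 0, 3, 6, 2, 5)
--     t = ''.join(s[i] for i in range(7))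
--     m = t[0] + t[2] + t[1] + t[3] + t[5] + t[4] + t[6]
--     best = None
--     for _ in range(6):
--         for c in (t, m):
--             if best is None or c < best:
--                 best = c
--         t = ''.join(t[i] for i in rho)
--         m = ''.join(m[i] for i in rho)
--     return best
-- ===== Notes on version B (the rewrite author's own statement) =====
-- stated objective: alternative
-- what changed: Replaces the hardcoded table of 12 index tuples (build all 12 permuted lists, sort, take [0]) by group-orbit generation: the 12 candidates are produced by repeatedly applying one rotation permutation to the string and to its mirror image, while a running lexicographic minimum is kept; only two generator permutations appear in the code.
import Mathlib
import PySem

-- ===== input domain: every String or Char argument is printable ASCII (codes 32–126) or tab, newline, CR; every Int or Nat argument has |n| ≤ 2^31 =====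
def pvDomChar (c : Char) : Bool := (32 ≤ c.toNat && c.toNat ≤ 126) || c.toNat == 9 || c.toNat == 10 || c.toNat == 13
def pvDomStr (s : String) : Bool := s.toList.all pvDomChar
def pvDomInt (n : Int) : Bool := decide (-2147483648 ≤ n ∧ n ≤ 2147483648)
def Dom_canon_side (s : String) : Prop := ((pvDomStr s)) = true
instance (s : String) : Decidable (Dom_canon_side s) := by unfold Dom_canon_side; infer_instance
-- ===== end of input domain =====

-- B generates the 12 candidates as the orbit of the layout and of its mirror image under
-- repeated application of one rotation permutation, keeping a running lexicographic minimum,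
-- instead of A's hardcoded table of 12 index tuples sorted as a whole (objective: alternative).

-- ===== PORT A =====
def canon_side (s : String) : String :=
  let cs := s.toList
  let g : Int → Char := fun i => PySem.List.pyGetD cs i ' '
  let combs : List (List Char) :=
    [ [g 0, g 1, g 2, g 3, g 4, g 5, g 6],
      [g 1, g 4, g 0, g 3, g 6, g 2, g 5],
      [g 4, g 6, g 1, g 3, g 5, g 0, g 2],
      [g 6, g 5, g 4, g 3, g 2, g 1, g 0],
      [g 5, g 2, g 6, g 3, g 0, g 4, g 1],
      [g 2, g 0, g 5, g 3, g 1, g 6, g 4],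
      [g 1, g 0, g 4, g 3, g 2, g 6, g 5],
      [g 4, g 1, g 6, g 3, g 0, g 5, g 2],
      [g 6, g 4, g 5, g 3, g 1, g 2, g 0],
      [g 5, g 6, g 2, g 3, g 4, g 0, g 1],
      [g 2, g 5, g 0, g 3, g 6, g 1, g 4],
      [g 0, g 2, g 1, g 3, g 5, g 4, g 6] ]
  String.ofList (PySem.List.pyGetD (PySem.List.sorted combs (fun x => x) false) 0 [])

-- ===== PORT B =====
-- ''.join(t[i] for i in rho), rho = (1,4,0,3,6,2,5)
def rotStr (t : List Char) : List Char :=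
  [ PySem.List.pyGetD t 1 ' ', PySem.List.pyGetD t 4 ' ', PySem.List.pyGetD t 0 ' ',
    PySem.List.pyGetD t 3 ' ', PySem.List.pyGetD t 6 ' ', PySem.List.pyGetD t 2 ' ',
    PySem.List.pyGetD t 5 ' ' ]

-- 'if best is None or c < best: best = c'
def bestUpd (best : Option (List Char)) (c : List Char) : Option (List Char) :=
  match best with
  | none => some c
  | some b => if c < b then some c else some b

-- 'for _ in range(6): …' with loop state (best, t, m)
def canonLoop : Nat → Option (List Char) → List Char → List Char → Option (List Char)
  | 0, best, _, _ => best
  | n + 1, best, t, m => canonLoop n (bestUpd (bestUpd best t) m) (rotStr t) (rotStr m)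

def canon_side_alt (s : String) : String :=
  let cs := s.toList
  let g : Int → Char := fun i => PySem.List.pyGetD cs i ' '
  let t0 : List Char := [g 0, g 1, g 2, g 3, g 4, g 5, g 6]
  let m0 : List Char :=
    [ PySem.List.pyGetD t0 0 ' ', PySem.List.pyGetD t0 2 ' ', PySem.List.pyGetD t0 1 ' ',
      PySem.List.pyGetD t0 3 ' ', PySem.List.pyGetD t0 5 ' ', PySem.List.pyGetD t0 4 ' ',
      PySem.List.pyGetD t0 6 ' ' ]
  String.ofList ((canonLoop 6 none t0 m0).getD [])

-- ===== PRECONDITION & SPEC =====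
-- Pre_ excludes strings shorter than 7 characters, on which the Python A raises IndexError.
def Pre_canon_side (s : String) : Prop := 7 ≤ PySem.Str.len s
instance (s : String) : Decidable (Pre_canon_side s) := by unfold Pre_canon_side; infer_instance
def pvWitness_canon_side : String := "badcfeg"

def Spec_canon_side (s : String) (out : String) : Prop := out = canon_side_alt s
instance (s : String) (out : String) : Decidable (Spec_canon_side s out) := by unfold Spec_canon_side; infer_instance

-- ===== CLAIM (what is proved, stated in full; the proofs are below) =====
def Claim_equal_canon_side : Prop := ∀ (s : String), Dom_canon_side s → Pre_canon_side s → Spec_canon_side s (canon_side s)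

-- ===== LEMMAS AND PROOFS =====

-- A's 'sorted(xs)[0]' is the running minimum of xs (equal as values even on ties).
lemma pyGetD_sorted_zero_eq_min (x : List Char) (t : List (List Char)) (d : List Char) :
    PySem.List.pyGetD (PySem.List.sorted (x :: t) (fun y => y) false) 0 d
      = t.foldl min x := by
  cases hs : PySem.List.sorted (x :: t) (fun y => y) false with
  | nil => exact absurd ((PySem.List.sorted_eq_nil_iff (x :: t) (fun y => y) false).mp hs) (by simp)
  | cons m t' =>
    rw [PySem.List.pyGetD_zero_cons]
    have hs' : @PySem.List.sorted (List Char) (List Char) _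
        (@LinearOrder.toDecidableLT _ List.instLinearOrder) (x :: t) (fun y => y) false
        = m :: t' := by
      rw [← hs]; congr 1
    have hmin : ∀ y ∈ x :: t, m ≤ y := PySem.List.key_head_sorted_le (x :: t) (fun y => y) hs'
    have hmem : m ∈ x :: t :=
      (PySem.List.sorted_perm (x :: t) (fun y => y) false).mem_iff.mp
        (by rw [hs]; exact List.mem_cons_self)
    have hmc : @PySem.List.min? (List Char) (List Char) List.instLinearOrder.toLT
        LinearOrder.toDecidableLT (x :: t) (fun y => y) = some (t.foldl min x) :=
      PySem.List.min?_id_cons x t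
    exact le_antisymm
      (hmin _ (@PySem.List.min?_mem (List Char) (List Char) List.instLinearOrder.toLT
        LinearOrder.toDecidableLT _ _ _ hmc))
      ((PySem.List.min?_isMin hmc) _ hmem)

-- B's update step is a minimum.
lemma bestUpd_some (b c : List Char) : bestUpd (some b) c = some (min c b) := by
  show (if c < b then some c else some b) = some (min c b)
  rcases lt_trichotomy c b with h | h | h
  · rw [if_pos h, min_eq_left h.le]
  · subst h; simp
  · rw [if_neg (not_lt.mpr h.le), min_eq_right h.le]

lemma pyGetD7_0 (a b c d e f g : Char) :
    PySem.List.pyGetD [a, b, c, d, e, f, g] 0 ' ' = a := rfl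
lemma pyGetD7_1 (a b c d e f g : Char) :
    PySem.List.pyGetD [a, b, c, d, e, f, g] 1 ' ' = b := rfl
lemma pyGetD7_2 (a b c d e f g : Char) :
    PySem.List.pyGetD [a, b, c, d, e, f, g] 2 ' ' = c := rfl
lemma pyGetD7_3 (a b c d e f g : Char) :
    PySem.List.pyGetD [a, b, c, d, e, f, g] 3 ' ' = d := rfl
lemma pyGetD7_4 (a b c d e f g : Char) :
    PySem.List.pyGetD [a, b, c, d, e, f, g] 4 ' ' = e := rfl
lemma pyGetD7_5 (a b c d e f g : Char) :
    PySem.List.pyGetD [a, b, c, d, e, f, g] 5 ' ' = f := rfl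
lemma pyGetD7_6 (a b c d e f g : Char) :
    PySem.List.pyGetD [a, b, c, d, e, f, g] 6 ' ' = g := rfl

-- rotStr on an explicit 7-element list.
lemma rotStr_explicit (a b c d e f g : Char) :
    rotStr [a, b, c, d, e, f, g] = [b, e, a, d, g, c, f] := rfl


-- canonLoop 6 unrolled (definitional) and expressed as a foldr of min.
lemma bestUpd_none (c : List Char) : bestUpd none c = some c := rfl

lemma canonLoop_run (t m : List Char) :
    canonLoop 6 none t m = some (List.foldr min t
      [ (rotStr (rotStr (rotStr (rotStr (rotStr (m)))))),
        (rotStr (rotStr (rotStr (rotStr (rotStr (t)))))),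
        (rotStr (rotStr (rotStr (rotStr (m))))),
        (rotStr (rotStr (rotStr (rotStr (t))))),
        (rotStr (rotStr (rotStr (m)))),
        (rotStr (rotStr (rotStr (t)))),
        (rotStr (rotStr (m))),
        (rotStr (rotStr (t))),
        (rotStr (m)),
        (rotStr (t)),
        (m) ]) := by
  have h : canonLoop 6 none t m = bestUpd (bestUpd (bestUpd (bestUpd (bestUpd (bestUpd (bestUpd (bestUpd (bestUpd (bestUpd (bestUpd (bestUpd none (t)) (m)) (rotStr (t))) (rotStr (m))) (rotStr (rotStr (t)))) (rotStr (rotStr (m)))) (rotStr (rotStr (rotStr (t))))) (rotStr (rotStr (rotStr (m))))) (rotStr (rotStr (rotStr (rotStr (t)))))) (rotStr (rotStr (rotStr (rotStr (m)))))) (rotStr (rotStr (rotStr (rotStr (rotStr (t))))))) (rotStr (rotStr (rotStr (rotStr (rotStr (m)))))) := rfl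
  rw [h]
  simp only [bestUpd_none, bestUpd_some, List.foldr]

-- the left fold of min is bounded by its base and by every list element
lemma foldl_min_le_init (l : List (List Char)) (x : List Char) : l.foldl min x ≤ x := by
  induction l generalizing x with
  | nil => exact le_refl x
  | cons a t ih => exact (ih (min x a)).trans (min_le_left x a)

lemma foldl_min_le (l : List (List Char)) (x z : List Char) (h : z ∈ x :: l) :
    l.foldl min x ≤ z := by
  induction l generalizing x with
  | nil =>
    simp only [List.mem_cons, List.not_mem_nil, or_false] at h
    simp [h]
  | cons a t ih =>
    simp only [List.foldl_cons]
    rcases List.mem_cons.mp h with h | h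
    · subst h; exact (foldl_min_le_init t (min z a)).trans (min_le_left z a)
    · rcases List.mem_cons.mp h with h | h
      · subst h; exact (foldl_min_le_init t (min x z)).trans (min_le_right x z)
      · exact ih _ (List.mem_cons_of_mem _ h)

lemma foldl_min_mem (l : List (List Char)) (x : List Char) :
    l.foldl min x ∈ x :: l := by
  induction l generalizing x with
  | nil => simp
  | cons a t ih =>
    simp only [List.foldl_cons]
    rcases List.mem_cons.mp (ih (min x a)) with h | h
    · rw [h]
      rcases min_choice x a with hc | hc <;> rw [hc] <;> simp
    · exact List.mem_cons_of_mem _ (List.mem_cons_of_mem _ h)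

lemma foldr_min_le (l : List (List Char)) (x z : List Char) (h : z ∈ x :: l) :
    l.foldr min x ≤ z := by
  induction l with
  | nil => simp only [List.mem_cons, List.not_mem_nil, or_false] at h; simp [h]
  | cons a t ih =>
    simp only [List.foldr_cons]
    rcases List.mem_cons.mp h with h | h
    · subst h
      exact le_trans (min_le_right _ _) (ih List.mem_cons_self)
    · rcases List.mem_cons.mp h with h | h
      · subst h; exact min_le_left _ _
      · exact le_trans (min_le_right _ _) (ih (List.mem_cons_of_mem _ h))

lemma foldr_min_mem (l : List (List Char)) (x : List Char) :
    l.foldr min x ∈ x :: l := by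
  induction l with
  | nil => simp
  | cons a t ih =>
    simp only [List.foldr_cons]
    rcases min_choice a (t.foldr min x) with hc | hc <;> rw [hc]
    · simp
    · rcases List.mem_cons.mp ih with h | h <;> simp [h]

-- two min-folds over lists with the same elements are equal
lemma min_fold_eq (x y : List Char) (l1 l2 : List (List Char))
    (h1 : ∀ z ∈ x :: l1, z ∈ y :: l2) (h2 : ∀ z ∈ y :: l2, z ∈ x :: l1) :
    l1.foldl min x = l2.foldr min y :=
  le_antisymm
    (foldl_min_le l1 x _ (h2 _ (foldr_min_mem l2 y)))
    (foldr_min_le l2 y _ (h1 _ (foldl_min_mem l1 x)))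

-- ===== VERDICT (by name: the statement is the Claim_ definition above) =====
set_option maxHeartbeats 2000000 in
theorem canon_side_spec : Claim_equal_canon_side := by
  intro s _ _
  simp only [Spec_canon_side, canon_side, canon_side_alt]
  simp only [pyGetD7_0, pyGetD7_1, pyGetD7_2, pyGetD7_3, pyGetD7_4, pyGetD7_5, pyGetD7_6]
  generalize PySem.List.pyGetD s.toList 0 ' ' = a0
  generalize PySem.List.pyGetD s.toList 1 ' ' = a1
  generalize PySem.List.pyGetD s.toList 2 ' ' = a2
  generalize PySem.List.pyGetD s.toList 3 ' ' = a3
  generalize PySem.List.pyGetD s.toList 4 ' ' = a4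
  generalize PySem.List.pyGetD s.toList 5 ' ' = a5
  generalize PySem.List.pyGetD s.toList 6 ' ' = a6
  rw [pyGetD_sorted_zero_eq_min]
  refine congrArg String.ofList ?_
  rw [canonLoop_run, Option.getD_some]
  refine min_fold_eq _ _ _ _ ?_ ?_ <;>
    · intro z hz
      simp only [rotStr_explicit, List.mem_cons, List.not_mem_nil, or_false] at hz ⊢
      rcases hz with rfl | rfl | rfl | rfl | rfl | rfl | rfl | rfl | rfl | rfl | rfl | rfl <;>
        simp
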